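-- pv_equiv track=rewrite | github.com/dapren/dapren | lib/jsonops.py | handle_colons_in_string
-- ===== SOURCE A (Python) =====
-- def handle_colons_in_string(json_str):
--     is_double_quotes_open = 0
--     newline = []
--
--     for i in range(len(json_str)):
--         char = json_str[i]
--
--         if char == '"':
--             if is_double_quotes_open == 0:
--                 is_double_quotes_open = 1
--             else:
--                 is_double_quotes_open = 0
--
--         if is_double_quotes_open:
--             if char == ':':
--                 char = "{COLON}"
--
--         newline.append(char)
--
--     return "".join(newline)
-- ===== SOURCE B (Python) =====
-- def handle_colons_in_string(json_str):
--     # Segments at odd indices of split('"') are the quoted contents.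
--     parts = json_str.split('"')
--     return '"'.join(p.replace(':', '{COLON}') if i % 2 else p
--                     for i, p in enumerate(parts))
-- ===== Notes on version B (the rewrite author's own statement) =====
-- stated objective: faster
-- what changed: Replaces A's per-character loop with an explicit quote-open toggle by splitting the string on the double-quote character, applying str.replace of colon with {COLON} only to the odd-indexed (inside-quotes) segments, and rejoining; the per-character Python loop disappears into C-level split/replace/join.
import Mathlib
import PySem

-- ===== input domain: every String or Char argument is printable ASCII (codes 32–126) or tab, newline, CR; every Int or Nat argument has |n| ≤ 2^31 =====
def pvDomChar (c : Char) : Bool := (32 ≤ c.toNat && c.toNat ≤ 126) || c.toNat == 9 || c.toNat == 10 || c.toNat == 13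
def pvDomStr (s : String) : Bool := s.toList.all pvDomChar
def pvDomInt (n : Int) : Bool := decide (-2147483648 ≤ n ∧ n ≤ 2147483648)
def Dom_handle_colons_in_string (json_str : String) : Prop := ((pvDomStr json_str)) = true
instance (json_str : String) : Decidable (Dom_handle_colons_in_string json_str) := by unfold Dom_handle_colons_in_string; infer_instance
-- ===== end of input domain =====

-- B replaces A's per-character quote-state toggle by splitting on the double-quote,
-- replacing colons in the odd (inside-quotes) segments, and rejoining; measured faster (constant factor).

-- ===== PORT A =====
-- A's loop state: (is_double_quotes_open, newline); each appended element is a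
-- one-char string or "{COLON}" (strings as List Char); "".join at the end.
def pvAStep (st : Bool × List (List Char)) (c : Char) : Bool × List (List Char) :=
  let o := if c = '"' then (if st.1 = false then true else false) else st.1
  let piece := if o = true then (if c = ':' then "{COLON}".toList else [c]) else [c]
  (o, st.2 ++ [piece])

def handle_colons_in_string (json_str : String) : String :=
  String.ofList (PySem.Chars.join [] (json_str.toList.foldl pvAStep (false, [])).2)

-- ===== PORT B =====
-- Source B: parts = json_str.split('"'); '"'.join(p.replace(':','{COLON}') if i % 2 else p for i, p in enumerate(parts))
def handle_colons_in_string_alt (json_str : String) : String :=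
  let parts := PySem.Chars.splitOn json_str.toList ['"']
  String.ofList (PySem.Chars.join ['"']
    ((PySem.List.enumerate parts 0).map
      (fun ip => if PySem.Int.mod ip.1 2 ≠ 0 then PySem.Chars.replace ip.2 [':'] "{COLON}".toList else ip.2)))

-- ===== PRECONDITION & SPEC =====
def Spec_handle_colons_in_string (json_str : String) (out : String) : Prop := out = handle_colons_in_string_alt json_str
instance (json_str : String) (out : String) : Decidable (Spec_handle_colons_in_string json_str out) := by unfold Spec_handle_colons_in_string; infer_instance

-- ===== CLAIM (what is proved, stated in full; the proofs are below) =====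
def Claim_equal_handle_colons_in_string : Prop := ∀ (json_str : String), Dom_handle_colons_in_string json_str → Spec_handle_colons_in_string json_str (handle_colons_in_string json_str)

-- ===== LEMMAS AND PROOFS =====

-- simple recursive characterisation of split on '"'
def pvSplitQ : List Char → List (List Char)
  | [] => [[]]
  | c :: rest =>
    if c = '"' then [] :: pvSplitQ rest
    else (c :: (pvSplitQ rest).headI) :: (pvSplitQ rest).tail

-- simple recursive characterisation of replace(':', '{COLON}')
def pvRepl : List Char → List Char
  | [] => []
  | c :: rest => (if c = ':' then "{COLON}".toList else [c]) ++ pvRepl rest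

-- the flattened-with-'"' alternating join; Bool = current segment is inside quotes
def pvG (o : Bool) : List (List Char) → List Char
  | [] => []
  | [p] => if o then pvRepl p else p
  | p :: q :: ps => (if o then pvRepl p else p) ++ '"' :: pvG (!o) (q :: ps)

-- A's flattened output from quote-state o
def pvPieces (o : Bool) : List Char → List Char
  | [] => []
  | c :: rest =>
    let o' := if c = '"' then !o else o
    (if o' ∧ c = ':' then "{COLON}".toList else [c]) ++ pvPieces o' rest

theorem pvSplitQ_ne_nil (cs : List Char) : pvSplitQ cs ≠ [] := by
  cases cs with
  | nil => simp [pvSplitQ]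
  | cons c rest => by_cases h : c = '"' <;> simp [pvSplitQ, h]

theorem pvSplitOn_go (cs : List Char) : ∀ (fuel : Nat) (cur : List Char) (acc : List (List Char)),
    cs.length ≤ fuel →
    PySem.Chars.splitOn.go ['"'] fuel cs cur acc
      = acc.reverse ++ (cur.reverse ++ (pvSplitQ cs).headI) :: (pvSplitQ cs).tail := by
  induction cs with
  | nil =>
    intro fuel cur acc _
    cases fuel <;> simp [PySem.Chars.splitOn.go, pvSplitQ]
  | cons c rest ih =>
    intro fuel cur acc hle
    cases fuel with
    | zero => simp at hle
    | succ f =>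
      by_cases h : c = '"'
      · subst h
        rw [show PySem.Chars.splitOn.go ['"'] (f+1) ('"' :: rest) cur acc
              = PySem.Chars.splitOn.go ['"'] f rest [] (cur.reverse :: acc) from by
            simp [PySem.Chars.splitOn.go, List.isPrefixOf]]
        rw [ih f [] (cur.reverse :: acc) (by simpa using hle)]
        obtain ⟨h0, t0, hq⟩ : ∃ h0 t0, pvSplitQ rest = h0 :: t0 := by
          cases hq : pvSplitQ rest with
          | nil => exact absurd hq (pvSplitQ_ne_nil rest)
          | cons a b => exact ⟨a, b, rfl⟩
        simp [pvSplitQ, hq]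
      · rw [show PySem.Chars.splitOn.go ['"'] (f+1) (c :: rest) cur acc
              = PySem.Chars.splitOn.go ['"'] f rest (c :: cur) acc from by
            simp [PySem.Chars.splitOn.go, List.isPrefixOf]
            intro hc; exact absurd hc.symm h]
        rw [ih f (c :: cur) acc (by simpa using hle)]
        simp [pvSplitQ, h]

theorem pvSplitOn_eq (cs : List Char) : PySem.Chars.splitOn cs ['"'] = pvSplitQ cs := by
  rw [PySem.Chars.splitOn, pvSplitOn_go cs (cs.length + 1) [] [] (by omega)]
  obtain ⟨h0, t0, hq⟩ : ∃ h0 t0, pvSplitQ cs = h0 :: t0 := by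
    cases hq : pvSplitQ cs with
    | nil => exact absurd hq (pvSplitQ_ne_nil cs)
    | cons a b => exact ⟨a, b, rfl⟩
  simp [hq]

theorem pvReplace_go (cs : List Char) : ∀ (fuel : Nat) (acc : List Char),
    cs.length ≤ fuel →
    PySem.Chars.replace.go [':'] "{COLON}".toList fuel cs acc = acc.reverse ++ pvRepl cs := by
  induction cs with
  | nil =>
    intro fuel acc _
    cases fuel <;> simp [PySem.Chars.replace.go, pvRepl]
  | cons c rest ih =>
    intro fuel acc hle
    cases fuel with
    | zero => simp at hle
    | succ f =>
      by_cases h : c = ':'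
      · subst h
        rw [show PySem.Chars.replace.go [':'] "{COLON}".toList (f+1) (':' :: rest) acc
              = PySem.Chars.replace.go [':'] "{COLON}".toList f rest ("{COLON}".toList.reverse ++ acc) from by
            simp [PySem.Chars.replace.go, List.isPrefixOf]]
        rw [ih f _ (by simpa using hle)]
        simp [pvRepl]
      · rw [show PySem.Chars.replace.go [':'] "{COLON}".toList (f+1) (c :: rest) acc
              = PySem.Chars.replace.go [':'] "{COLON}".toList f rest (c :: acc) from by
            simp only [PySem.Chars.replace.go, List.isPrefixOf, Bool.and_true, beq_iff_eq]
            rw [if_neg (fun hc : ':' = c => h hc.symm)]]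
        rw [ih f _ (by simpa using hle)]
        simp [pvRepl, h]

theorem pvReplace_eq (cs : List Char) :
    PySem.Chars.replace cs [':'] "{COLON}".toList = pvRepl cs := by
  rw [PySem.Chars.replace]
  rw [if_neg (by simp)]
  rw [pvReplace_go cs cs.length [] (le_refl _)]
  simp

theorem pvJoinNilAppend (parts : List (List Char)) : ∀ (piece : List Char),
    PySem.Chars.join [] (parts ++ [piece]) = PySem.Chars.join [] parts ++ piece := by
  induction parts with
  | nil => intro piece; simp [PySem.Chars.join_nil, PySem.Chars.join_singleton]
  | cons p ps ih =>
    intro piece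
    cases ps with
    | nil => simp [PySem.Chars.join_cons_cons, PySem.Chars.join_singleton]
    | cons q ps' =>
      rw [List.cons_append, List.cons_append, PySem.Chars.join_cons_cons,
          PySem.Chars.join_cons_cons]
      simp only [← List.cons_append]
      rw [ih]
      simp

-- A's foldl accumulates exactly pvPieces (flattened)
theorem pvFoldA (cs : List Char) : ∀ (o : Bool) (parts : List (List Char)),
    PySem.Chars.join [] (cs.foldl pvAStep (o, parts)).2
      = PySem.Chars.join [] parts ++ pvPieces o cs := by
  induction cs with
  | nil => intro o parts; simp [pvPieces]
  | cons c rest ih =>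
    intro o parts
    have hstep : pvAStep (o, parts) c
        = (if c = '"' then !o else o,
           parts ++ [if (if c = '"' then !o else o) ∧ c = ':' then "{COLON}".toList else [c]]) := by
      by_cases h : c = '"'
      · subst h
        cases o <;> simp [pvAStep]
      · by_cases h2 : c = ':' <;> cases o <;> simp [pvAStep, h, h2]
    simp only [List.foldl_cons, hstep, ih, pvJoinNilAppend]
    simp [pvPieces]

-- A's flattened output equals the alternating join of the split
theorem pvMain (cs : List Char) : ∀ (o : Bool), pvPieces o cs = pvG o (pvSplitQ cs) := by
  induction cs with
  | nil => intro o; cases o <;> rfl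
  | cons c rest ih =>
    intro o
    obtain ⟨h0, t0, hq⟩ : ∃ h0 t0, pvSplitQ rest = h0 :: t0 := by
      cases hq : pvSplitQ rest with
      | nil => exact absurd hq (pvSplitQ_ne_nil rest)
      | cons a b => exact ⟨a, b, rfl⟩
    by_cases h : c = '"'
    · subst h
      have : pvPieces o ('"' :: rest) = '"' :: pvPieces (!o) rest := by
        cases o <;> simp [pvPieces]
      rw [this, ih (!o)]
      simp only [pvSplitQ, hq]
      cases o <;> simp [pvG, pvRepl]
    · have hp : pvPieces o (c :: rest)
          = (if o ∧ c = ':' then "{COLON}".toList else [c]) ++ pvPieces o rest := by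
        simp [pvPieces, h]
      rw [hp, ih o]
      simp only [pvSplitQ, if_neg h, hq]
      cases t0 with
      | nil =>
        cases o <;> by_cases h2 : c = ':' <;> simp [pvG, pvRepl, List.headI, h2]
      | cons q t1 =>
        cases o <;> by_cases h2 : c = ':' <;> simp [pvG, pvRepl, List.headI, h2]

-- B's enumerate-parity map equals the alternating join pvG
theorem pvMapB (ps : List (List Char)) : ∀ (k : Nat),
    PySem.Chars.join ['"']
      ((PySem.List.enumerate ps (k : Int)).map
        (fun ip => if PySem.Int.mod ip.1 2 ≠ 0 then pvRepl ip.2 else ip.2))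
      = pvG (decide (k % 2 = 1)) ps := by
  induction ps with
  | nil => intro k; simp [PySem.List.enumerate_nil, PySem.Chars.join_nil, pvG]
  | cons p ps ih =>
    intro k
    have hmod : PySem.Int.mod (k : Int) 2 = ((k % 2 : Nat) : Int) := by
      have := PySem.Int.mod_natCast k 2
      exact_mod_cast this
    have hsucc : ((k : Int) + 1) = ((k + 1 : Nat) : Int) := by push_cast; ring
    have hflip : decide ((k + 1) % 2 = 1) = !decide (k % 2 = 1) := by
      by_cases hk : k % 2 = 1
      · simp [hk, show (k + 1) % 2 = 0 by omega]
      · simp [hk, show (k + 1) % 2 = 1 by omega]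
    cases ps with
    | nil =>
      simp only [PySem.List.enumerate_cons, PySem.List.enumerate_nil, List.map_cons,
        List.map_nil, PySem.Chars.join_singleton, hmod]
      by_cases hk : k % 2 = 1
      · rw [hk, if_pos (by norm_num)]
        simp [pvG]
      · have hk0 : k % 2 = 0 := by omega
        rw [hk0, if_neg (by norm_num)]
        simp [pvG]
    | cons q ps' =>
      have ihk := ih (k + 1)
      rw [← hsucc] at ihk
      simp only [PySem.List.enumerate_cons, List.map_cons] at ihk ⊢
      rw [PySem.Chars.join_cons_cons, ihk, hflip, hmod]
      by_cases hk : k % 2 = 1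
      · rw [hk, if_pos (by norm_num)]
        simp [pvG]
      · have hk0 : k % 2 = 0 := by omega
        rw [hk0, if_neg (by norm_num)]
        simp [pvG]

-- ===== VERDICT (by name: the statement is the Claim_ definition above) =====
theorem handle_colons_in_string_spec : Claim_equal_handle_colons_in_string := by
  intro json_str _
  unfold Spec_handle_colons_in_string handle_colons_in_string handle_colons_in_string_alt
  congr 1
  have hA := pvFoldA json_str.toList false []
  rw [PySem.Chars.join_nil, List.nil_append] at hA
  rw [hA, pvMain json_str.toList false, pvSplitOn_eq]
  have hB := pvMapB (pvSplitQ json_str.toList) 0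
  simp only [Nat.cast_zero, show decide ((0:Nat) % 2 = 1) = false from rfl] at hB
  rw [← hB]
  congr 1
  apply List.map_congr_left
  intro ip _
  by_cases h : PySem.Int.mod ip.1 2 ≠ 0
  · rw [if_pos h, if_pos h]
    exact (pvReplace_eq ip.2).symm
  · rw [if_neg h, if_neg h]
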